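-- pv_equiv track=rewrite | github.com/alicchm/GeneHelperPublic | model.py | visualize_sequence_differences
-- ===== SOURCE A (Python) =====
-- def visualize_sequence_differences(x, y, difference_list): #podstawowa wizualizacja różnicy podanych sekwencji
--     difference_list_flat0 = [i[1]-1 for i in difference_list] #wybranie tylko miejsc (indeksów od 0) mutacji z listy
--
--     n_columns = 50 #maksymalna liczba znaków pojawiająca się w jednym wierszu
--     max_len = max(len(x), len(y)) #maksymalna liczba znaków w porównywanych sekwencjach
--
--     if max_len%n_columns != 0: #sprawdzenie czy maksymalna liczba znaków jest podzielna przez maksymalną liczbę znaków wyświetlaną w pojedynczym wierszu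
--         max_len = ((max_len//n_columns)+1)*n_columns #maksymalna liczba znaków równa jest najbliższej, większej wielokrotności maksymalnej liczby znaków pojawiającej się w jednym wierszu
--
--     #dodanie białych znaków do sekwencji, żeby miały długość równą max_len - zapobieganie błędom typu 'index out of range' przy późniejszej wizualizacji
--     x += " "*(max_len-len(x))
--     y += " "*(max_len-len(y))
--
--     seq_row_count = max_len // n_columns #liczba wierszy na wizualizacji
--
--     output = ''
--
--     for i in range(seq_row_count): #dla każdego wiersza na wizualizacji
--         for j in range(n_columns): #wyświetlane jest n_columns-znaków z sekwencji pierwszej (x)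
--             if (i*n_columns+j) in difference_list_flat0 and x[i*n_columns+j] == y[i*n_columns+j]: #jeśli mutacja nie zmieniła sensu sekwencji
--                 output += "<font color = #238823>"
--                 output += str(x[i*n_columns+j])
--                 output += "</font>"
--             elif x[i*n_columns+j] != y[i*n_columns+j] and y[i*n_columns+j] == '*': #jeśli mutacja zmieniła sens sekwencji (powstanie kodonu STOP)
--                 output += "<font color = #2568B0>"
--                 output += str(x[i*n_columns+j])
--                 output += "</font>"
--             elif x[i*n_columns+j] != y[i*n_columns+j] and y[i*n_columns+j] != '*': #jeśli mutacja zmieniła sens sekwencji (zmiana symbolu nukleotydu/aminokwasu)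
--                 output += "<font color = #d2222d>"
--                 output += str(x[i*n_columns+j])
--                 output += "</font>"
--             else: #brak zmian w sekwencji
--                 output += str(x[i*n_columns+j])
--         output += "<br>"
--         for j in range(n_columns): #wyświetlane jest n_columns-znaków z sekwencji drugiej )y
--             if (i*n_columns+j) in difference_list_flat0 and x[i*n_columns+j] == y[i*n_columns+j]: #jeśli mutacja nie zmieniła sensu sekwencji
--                 output += "<font color = #238823>"
--                 output += str(y[i*n_columns+j])
--                 output += "</font>"
--             elif x[i*n_columns+j] != y[i*n_columns+j] and y[i*n_columns+j] == '*': #jeśli mutacja zmieniła sens sekwencji (powstanie kodonu STOP)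
--                 output += "<font color = #2568B0>"
--                 output += str(y[i*n_columns+j])
--                 output += "</font>"
--             elif x[i*n_columns+j] != y[i*n_columns+j] and y[i*n_columns+j] != '*': #jeśli mutacja zmieniła sens sekwencji (zmiana symbolu nukleotydu/aminokwasu)
--                 output += "<font color = #d2222d>"
--                 output += str(y[i*n_columns+j])
--                 output += "</font>"
--             else: #brak zmian w sekwencji
--                 output += str(y[i*n_columns+j])
--         output += "<br>"
--         for j in range(n_columns): #zaznaczenie różnic w sekwencjach znakiem '^'
--             sign = "&nbsp;"
--             if x[i*n_columns+j] != y[i*n_columns+j] or (i*n_columns+j) in difference_list_flat0: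
--                 sign = "^"
--             output += sign
--         output += "<br><br>"
--
--     return output
-- ===== SOURCE B (Python) =====
-- def visualize_sequence_differences(x, y, difference_list):
--     # one pass precomputes per-position cells, then rows are emitted by chunking
--     flagged = {d[1] - 1 for d in difference_list}
--     n = 50
--     max_len = max(len(x), len(y))
--     if max_len % n != 0:
--         max_len = (max_len // n + 1) * n
--     x = x + " " * (max_len - len(x))
--     y = y + " " * (max_len - len(y))
--
--     cells = []
--     for i in range(max_len):
--         a, b = x[i], y[i]
--         if i in flagged and a == b:
--             tag = "<font color = #238823>"
--         elif a != b:
--             tag = "<font color = #2568B0>" if b == '*' else "<font color = #d2222d>"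
--         else:
--             tag = None
--         wa = a if tag is None else tag + a + "</font>"
--         wb = b if tag is None else tag + b + "</font>"
--         mark = "^" if (a != b or i in flagged) else "&nbsp;"
--         cells.append((wa, wb, mark))
--
--     parts = []
--     for r in range(0, max_len, n):
--         chunk = cells[r:r + n]
--         parts.append("".join(c[0] for c in chunk))
--         parts.append("<br>")
--         parts.append("".join(c[1] for c in chunk))
--         parts.append("<br>")
--         parts.append("".join(c[2] for c in chunk))
--         parts.append("<br><br>")
--     return "".join(parts)
-- ===== Notes on version B (the rewrite author's own statement) =====
-- stated objective: simpler
-- what changed: B makes one pass over positions building a per-position table of (wrapped x-char, wrapped y-char, marker) with the colour branch evaluated once per position, then emits the HTML rows by chunking the table in groups of 50 and joining, instead of A's three separate per-row scans that each recompute the branch per character.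
import Mathlib
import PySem

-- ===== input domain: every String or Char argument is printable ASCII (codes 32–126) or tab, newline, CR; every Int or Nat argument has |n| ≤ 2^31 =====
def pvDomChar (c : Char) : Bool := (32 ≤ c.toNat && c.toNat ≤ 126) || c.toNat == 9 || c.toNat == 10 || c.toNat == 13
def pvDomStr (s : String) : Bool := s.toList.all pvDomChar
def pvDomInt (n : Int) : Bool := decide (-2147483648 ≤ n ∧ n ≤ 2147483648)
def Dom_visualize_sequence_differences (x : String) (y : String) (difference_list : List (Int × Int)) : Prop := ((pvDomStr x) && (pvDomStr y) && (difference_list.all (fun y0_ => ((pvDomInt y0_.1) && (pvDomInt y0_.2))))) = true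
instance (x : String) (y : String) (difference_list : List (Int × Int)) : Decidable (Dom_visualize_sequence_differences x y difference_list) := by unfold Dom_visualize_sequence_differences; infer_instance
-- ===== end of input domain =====

-- B precomputes a per-position cell table in one pass and emits the rows by chunking it,
-- instead of A's three per-row scans that each recompute the colour branch (objective: simpler decomposition).

-- ===== PORT A =====
-- step-for-step port of A; strings are handled on the List Char side (Lean's String.append is kernel-opaque)
def visualize_sequence_differences (x : String) (y : String) (difference_list : List (Int × Int)) : String :=
  let flat0 : List Int := difference_list.map (fun i => i.2 - 1)
  let nCols : Nat := 50
  let maxLen0 : Nat := max x.toList.length y.toList.length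
  let maxLen : Nat := if maxLen0 % nCols ≠ 0 then (maxLen0 / nCols + 1) * nCols else maxLen0
  let xl : List Char := x.toList ++ List.replicate (maxLen - x.toList.length) ' '
  let yl : List Char := y.toList ++ List.replicate (maxLen - y.toList.length) ' '
  let seqRowCount : Nat := maxLen / nCols
  let output : List Char :=
    (List.range seqRowCount).foldl (fun output i =>
      -- second loop (y line), applied to: first loop (x line) ++ "<br>"
      (List.range nCols).foldl (fun o j =>
        if ((i*nCols+j : Nat) : Int) ∈ flat0 ∧ xl.getD (i*nCols+j) ' ' = yl.getD (i*nCols+j) ' ' then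
          o ++ "<font color = #238823>".toList ++ [yl.getD (i*nCols+j) ' '] ++ "</font>".toList
        else if xl.getD (i*nCols+j) ' ' ≠ yl.getD (i*nCols+j) ' ' ∧ yl.getD (i*nCols+j) ' ' = '*' then
          o ++ "<font color = #2568B0>".toList ++ [yl.getD (i*nCols+j) ' '] ++ "</font>".toList
        else if xl.getD (i*nCols+j) ' ' ≠ yl.getD (i*nCols+j) ' ' ∧ yl.getD (i*nCols+j) ' ' ≠ '*' then
          o ++ "<font color = #d2222d>".toList ++ [yl.getD (i*nCols+j) ' '] ++ "</font>".toList
        else o ++ [yl.getD (i*nCols+j) ' '])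
        ((List.range nCols).foldl (fun o j =>
          if ((i*nCols+j : Nat) : Int) ∈ flat0 ∧ xl.getD (i*nCols+j) ' ' = yl.getD (i*nCols+j) ' ' then
            o ++ "<font color = #238823>".toList ++ [xl.getD (i*nCols+j) ' '] ++ "</font>".toList
          else if xl.getD (i*nCols+j) ' ' ≠ yl.getD (i*nCols+j) ' ' ∧ yl.getD (i*nCols+j) ' ' = '*' then
            o ++ "<font color = #2568B0>".toList ++ [xl.getD (i*nCols+j) ' '] ++ "</font>".toList
          else if xl.getD (i*nCols+j) ' ' ≠ yl.getD (i*nCols+j) ' ' ∧ yl.getD (i*nCols+j) ' ' ≠ '*' then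
            o ++ "<font color = #d2222d>".toList ++ [xl.getD (i*nCols+j) ' '] ++ "</font>".toList
          else o ++ [xl.getD (i*nCols+j) ' '])
          output ++ "<br>".toList)
      ++ "<br>".toList
      -- third loop: the '^'/'&nbsp;' marker line (Python's 'sign' local is the if-expression)
      |> (List.range nCols).foldl (fun o j =>
            o ++ (if xl.getD (i*nCols+j) ' ' ≠ yl.getD (i*nCols+j) ' ' ∨ ((i*nCols+j : Nat) : Int) ∈ flat0
                  then "^".toList else "&nbsp;".toList))
      |> (· ++ "<br><br>".toList)) []
  String.ofList output

-- ===== PORT B =====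
-- port of Source B: the colour tag of one position (none = plain)
def vizTag (flagged : PySem.Set Int) (i : Nat) (a b : Char) : Option (List Char) :=
  if ((i : Int) ∈ flagged ∧ a = b) then some "<font color = #238823>".toList
  else if a ≠ b then
    (if b = '*' then some "<font color = #2568B0>".toList else some "<font color = #d2222d>".toList)
  else none

def vizWrap (c : Char) : Option (List Char) → List Char
  | some t => t ++ [c] ++ "</font>".toList
  | none => [c]

-- the precomputed cell of position i: (wrapped x-char, wrapped y-char, marker)
def vizCell (flagged : PySem.Set Int) (xl yl : List Char) (i : Nat) :
    List Char × List Char × List Char :=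
  let a := xl.getD i ' '
  let b := yl.getD i ' '
  let t := vizTag flagged i a b
  (vizWrap a t, vizWrap b t,
   if a ≠ b ∨ (i : Int) ∈ flagged then "^".toList else "&nbsp;".toList)

-- emit the rows: chunks of 50 cells, three joined lines per chunk ("".join of each line)
def vizRows (cells : List (List Char × List Char × List Char)) : List Char :=
  if cells = [] then []
  else
    ((cells.take 50).map (·.1)).flatten ++ "<br>".toList
      ++ ((cells.take 50).map (·.2.1)).flatten ++ "<br>".toList
      ++ ((cells.take 50).map (·.2.2)).flatten ++ "<br><br>".toList
      ++ vizRows (cells.drop 50)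
  termination_by cells.length
  decreasing_by
    rename_i h
    have : 0 < cells.length := List.length_pos_iff.mpr h
    simp [List.length_drop]; omega

def visualize_sequence_differences_alt (x : String) (y : String) (difference_list : List (Int × Int)) : String :=
  let flagged : PySem.Set Int := PySem.Set.ofList (difference_list.map (fun d => d.2 - 1))
  let n : Nat := 50
  let maxLen0 : Nat := max x.toList.length y.toList.length
  let maxLen : Nat := if maxLen0 % n ≠ 0 then (maxLen0 / n + 1) * n else maxLen0
  let xl : List Char := x.toList ++ List.replicate (maxLen - x.toList.length) ' '
  let yl : List Char := y.toList ++ List.replicate (maxLen - y.toList.length) ' '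
  let cells := (List.range maxLen).map (vizCell flagged xl yl)
  String.ofList (vizRows cells)

-- ===== PRECONDITION & SPEC =====
def Spec_visualize_sequence_differences (x : String) (y : String) (difference_list : List (Int × Int)) (out : String) : Prop := out = visualize_sequence_differences_alt x y difference_list
instance (x : String) (y : String) (difference_list : List (Int × Int)) (out : String) : Decidable (Spec_visualize_sequence_differences x y difference_list out) := by unfold Spec_visualize_sequence_differences; infer_instance

-- ===== CLAIM (what is proved, stated in full; the proofs are below) =====
def Claim_equal_visualize_sequence_differences : Prop := ∀ (x : String) (y : String) (difference_list : List (Int × Int)), Dom_visualize_sequence_differences x y difference_list → Spec_visualize_sequence_differences x y difference_list (visualize_sequence_differences x y difference_list)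

-- ===== LEMMAS AND PROOFS =====

-- a foldl that only appends to its accumulator is the flattened map
theorem viz_foldl_shape {α : Type} (f : List Char → α → List Char) (g : α → List Char)
    (h : ∀ o a, f o a = o ++ g a) :
    ∀ (l : List α) (o : List Char), l.foldl f o = o ++ (l.map g).flatten := by
  intro l
  induction l with
  | nil => intro o; simp
  | cons a l ih => intro o; simp [List.foldl_cons, h, ih, List.append_assoc]

-- the wrapped characters of one cell, written as A's if-chain
theorem viz_wrap_fst (flagged : PySem.Set Int) (i : Nat) (a b : Char) :
    vizWrap a (vizTag flagged i a b) =
      (if ((i : Int) ∈ flagged ∧ a = b) then "<font color = #238823>".toList ++ [a] ++ "</font>".toList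
       else if a ≠ b ∧ b = '*' then "<font color = #2568B0>".toList ++ [a] ++ "</font>".toList
       else if a ≠ b ∧ b ≠ '*' then "<font color = #d2222d>".toList ++ [a] ++ "</font>".toList
       else [a]) := by
  by_cases hm : (i : Int) ∈ flagged <;> by_cases hab : a = b <;> by_cases hst : b = '*' <;>
    simp_all [vizTag, vizWrap]

theorem viz_wrap_snd (flagged : PySem.Set Int) (i : Nat) (a b : Char) :
    vizWrap b (vizTag flagged i a b) =
      (if ((i : Int) ∈ flagged ∧ a = b) then "<font color = #238823>".toList ++ [b] ++ "</font>".toList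
       else if a ≠ b ∧ b = '*' then "<font color = #2568B0>".toList ++ [b] ++ "</font>".toList
       else if a ≠ b ∧ b ≠ '*' then "<font color = #d2222d>".toList ++ [b] ++ "</font>".toList
       else [b]) := by
  by_cases hm : (i : Int) ∈ flagged <;> by_cases hab : a = b <;> by_cases hst : b = '*' <;>
    simp_all [vizTag, vizWrap]

-- one emitted row block, reading the cells g at positions s..s+49
def vizBlock (g : Nat → List Char × List Char × List Char) (s : Nat) : List Char :=
  ((List.range 50).map (fun j => (g (s+j)).1)).flatten ++ "<br>".toList
    ++ ((List.range 50).map (fun j => (g (s+j)).2.1)).flatten ++ "<br>".toList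
    ++ ((List.range 50).map (fun j => (g (s+j)).2.2)).flatten ++ "<br><br>".toList

theorem vizRows_eq (g : Nat → List Char × List Char × List Char) :
    ∀ (r s : Nat), vizRows ((List.range' s (50*r)).map g)
      = ((List.range r).map (fun i => vizBlock g (s + 50*i))).flatten := by
  intro r
  induction r with
  | zero => intro s; simp [vizRows]
  | succ r ih =>
    intro s
    have h5 : 50*(r+1) = 50 + 50*r := by ring
    have hsplit : List.range' s (50*(r+1)) = List.range' s 50 ++ List.range' (s+50) (50*r) := by
      rw [h5, List.range'_append]
    rw [hsplit, List.map_append, vizRows]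
    have hne : (List.range' s 50).map g ++ (List.range' (s+50) (50*r)).map g ≠ [] := by
      simp [List.range'_eq_nil_iff]
    rw [if_neg hne]
    have hlen : ((List.range' s 50).map g).length = 50 := by simp
    rw [List.take_left' hlen, List.drop_left' hlen, ih (s+50)]
    have hmap : ∀ (p : List Char × List Char × List Char → List Char),
        ((List.range' s 50).map g).map p = (List.range 50).map (fun j => p (g (s+j))) := by
      intro p
      rw [List.range'_eq_map_range]
      simp [List.map_map, Function.comp]
    have hr : (List.range (r+1)).map (fun i => vizBlock g (s + 50*i))
        = vizBlock g s :: (List.range r).map (fun i => vizBlock g (s + 50 + 50*i)) := by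
      rw [List.range_succ_eq_map]
      simp only [List.map_cons, Nat.mul_zero, Nat.add_zero, List.map_map]
      congr 1
      apply List.map_congr_left
      intro i _
      simp only [Function.comp]
      congr 1
      omega
    rw [hmap, hmap, hmap, hr, List.flatten_cons]
    simp [vizBlock, List.append_assoc]

-- the heart of the equivalence, on the shared padded lists and rounded length
theorem viz_main (flat : List Int) (xl yl : List Char) (m : Nat) (hm : m % 50 = 0) :
    (List.range (m / 50)).foldl (fun output i =>
      (List.range 50).foldl (fun o j =>
        if ((i*50+j : Nat) : Int) ∈ flat ∧ xl.getD (i*50+j) ' ' = yl.getD (i*50+j) ' ' then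
          o ++ "<font color = #238823>".toList ++ [yl.getD (i*50+j) ' '] ++ "</font>".toList
        else if xl.getD (i*50+j) ' ' ≠ yl.getD (i*50+j) ' ' ∧ yl.getD (i*50+j) ' ' = '*' then
          o ++ "<font color = #2568B0>".toList ++ [yl.getD (i*50+j) ' '] ++ "</font>".toList
        else if xl.getD (i*50+j) ' ' ≠ yl.getD (i*50+j) ' ' ∧ yl.getD (i*50+j) ' ' ≠ '*' then
          o ++ "<font color = #d2222d>".toList ++ [yl.getD (i*50+j) ' '] ++ "</font>".toList
        else o ++ [yl.getD (i*50+j) ' '])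
        ((List.range 50).foldl (fun o j =>
          if ((i*50+j : Nat) : Int) ∈ flat ∧ xl.getD (i*50+j) ' ' = yl.getD (i*50+j) ' ' then
            o ++ "<font color = #238823>".toList ++ [xl.getD (i*50+j) ' '] ++ "</font>".toList
          else if xl.getD (i*50+j) ' ' ≠ yl.getD (i*50+j) ' ' ∧ yl.getD (i*50+j) ' ' = '*' then
            o ++ "<font color = #2568B0>".toList ++ [xl.getD (i*50+j) ' '] ++ "</font>".toList
          else if xl.getD (i*50+j) ' ' ≠ yl.getD (i*50+j) ' ' ∧ yl.getD (i*50+j) ' ' ≠ '*' then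
            o ++ "<font color = #d2222d>".toList ++ [xl.getD (i*50+j) ' '] ++ "</font>".toList
          else o ++ [xl.getD (i*50+j) ' '])
          output ++ "<br>".toList)
      ++ "<br>".toList
      |> (List.range 50).foldl (fun o j =>
            o ++ (if xl.getD (i*50+j) ' ' ≠ yl.getD (i*50+j) ' ' ∨ ((i*50+j : Nat) : Int) ∈ flat
                  then "^".toList else "&nbsp;".toList))
      |> (· ++ "<br><br>".toList)) []
    = vizRows ((List.range m).map (vizCell (PySem.Set.ofList flat) xl yl)) := by
  have h1 : ∀ (i : Nat) (o : List Char) (j : Nat),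
      (if ((i*50+j : Nat) : Int) ∈ flat ∧ xl.getD (i*50+j) ' ' = yl.getD (i*50+j) ' ' then
        o ++ "<font color = #238823>".toList ++ [xl.getD (i*50+j) ' '] ++ "</font>".toList
      else if xl.getD (i*50+j) ' ' ≠ yl.getD (i*50+j) ' ' ∧ yl.getD (i*50+j) ' ' = '*' then
        o ++ "<font color = #2568B0>".toList ++ [xl.getD (i*50+j) ' '] ++ "</font>".toList
      else if xl.getD (i*50+j) ' ' ≠ yl.getD (i*50+j) ' ' ∧ yl.getD (i*50+j) ' ' ≠ '*' then
        o ++ "<font color = #d2222d>".toList ++ [xl.getD (i*50+j) ' '] ++ "</font>".toList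
      else o ++ [xl.getD (i*50+j) ' '])
      = o ++ (vizCell (PySem.Set.ofList flat) xl yl (i*50+j)).1 := by
    intro i o j
    simp only [vizCell]
    rw [viz_wrap_fst]
    simp only [PySem.Set.mem_ofList]
    split_ifs <;> simp [List.append_assoc]
  have h2 : ∀ (i : Nat) (o : List Char) (j : Nat),
      (if ((i*50+j : Nat) : Int) ∈ flat ∧ xl.getD (i*50+j) ' ' = yl.getD (i*50+j) ' ' then
        o ++ "<font color = #238823>".toList ++ [yl.getD (i*50+j) ' '] ++ "</font>".toList
      else if xl.getD (i*50+j) ' ' ≠ yl.getD (i*50+j) ' ' ∧ yl.getD (i*50+j) ' ' = '*' then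
        o ++ "<font color = #2568B0>".toList ++ [yl.getD (i*50+j) ' '] ++ "</font>".toList
      else if xl.getD (i*50+j) ' ' ≠ yl.getD (i*50+j) ' ' ∧ yl.getD (i*50+j) ' ' ≠ '*' then
        o ++ "<font color = #d2222d>".toList ++ [yl.getD (i*50+j) ' '] ++ "</font>".toList
      else o ++ [yl.getD (i*50+j) ' '])
      = o ++ (vizCell (PySem.Set.ofList flat) xl yl (i*50+j)).2.1 := by
    intro i o j
    simp only [vizCell]
    rw [viz_wrap_snd]
    simp only [PySem.Set.mem_ofList]
    split_ifs <;> simp [List.append_assoc]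
  have h3 : ∀ (i : Nat) (o : List Char) (j : Nat),
      o ++ (if xl.getD (i*50+j) ' ' ≠ yl.getD (i*50+j) ' ' ∨ ((i*50+j : Nat) : Int) ∈ flat
            then "^".toList else "&nbsp;".toList)
      = o ++ (vizCell (PySem.Set.ofList flat) xl yl (i*50+j)).2.2 := by
    intro i o j
    simp only [vizCell, PySem.Set.mem_ofList]
  have hbody : ∀ (output : List Char) (i : Nat),
      ((List.range 50).foldl (fun o j =>
        if ((i*50+j : Nat) : Int) ∈ flat ∧ xl.getD (i*50+j) ' ' = yl.getD (i*50+j) ' ' then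
          o ++ "<font color = #238823>".toList ++ [yl.getD (i*50+j) ' '] ++ "</font>".toList
        else if xl.getD (i*50+j) ' ' ≠ yl.getD (i*50+j) ' ' ∧ yl.getD (i*50+j) ' ' = '*' then
          o ++ "<font color = #2568B0>".toList ++ [yl.getD (i*50+j) ' '] ++ "</font>".toList
        else if xl.getD (i*50+j) ' ' ≠ yl.getD (i*50+j) ' ' ∧ yl.getD (i*50+j) ' ' ≠ '*' then
          o ++ "<font color = #d2222d>".toList ++ [yl.getD (i*50+j) ' '] ++ "</font>".toList
        else o ++ [yl.getD (i*50+j) ' '])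
        ((List.range 50).foldl (fun o j =>
          if ((i*50+j : Nat) : Int) ∈ flat ∧ xl.getD (i*50+j) ' ' = yl.getD (i*50+j) ' ' then
            o ++ "<font color = #238823>".toList ++ [xl.getD (i*50+j) ' '] ++ "</font>".toList
          else if xl.getD (i*50+j) ' ' ≠ yl.getD (i*50+j) ' ' ∧ yl.getD (i*50+j) ' ' = '*' then
            o ++ "<font color = #2568B0>".toList ++ [xl.getD (i*50+j) ' '] ++ "</font>".toList
          else if xl.getD (i*50+j) ' ' ≠ yl.getD (i*50+j) ' ' ∧ yl.getD (i*50+j) ' ' ≠ '*' then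
            o ++ "<font color = #d2222d>".toList ++ [xl.getD (i*50+j) ' '] ++ "</font>".toList
          else o ++ [xl.getD (i*50+j) ' '])
          output ++ "<br>".toList)
      ++ "<br>".toList
      |> (List.range 50).foldl (fun o j =>
            o ++ (if xl.getD (i*50+j) ' ' ≠ yl.getD (i*50+j) ' ' ∨ ((i*50+j : Nat) : Int) ∈ flat
                  then "^".toList else "&nbsp;".toList))
      |> (· ++ "<br><br>".toList))
      = output ++ vizBlock (vizCell (PySem.Set.ofList flat) xl yl) (i*50) := by
    intro output i
    rw [viz_foldl_shape _ _ (h1 i), viz_foldl_shape _ _ (h2 i), viz_foldl_shape _ _ (h3 i)]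
    simp [vizBlock, List.append_assoc]
  rw [viz_foldl_shape _ _ hbody]
  have hm' : 50 * (m / 50) = m := by omega
  rw [show (List.range m).map (vizCell (PySem.Set.ofList flat) xl yl)
        = (List.range' 0 (50*(m/50))).map (vizCell (PySem.Set.ofList flat) xl yl) from by
      rw [hm', ← List.range_eq_range']]
  rw [vizRows_eq]
  simp only [List.nil_append]
  apply congrArg
  apply List.map_congr_left
  intro i _
  congr 1
  omega


-- ===== VERDICT (by name: the statement is the Claim_ definition above) =====
set_option maxHeartbeats 1000000 in
theorem visualize_sequence_differences_spec : Claim_equal_visualize_sequence_differences := by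
  intro x y dl _
  unfold Spec_visualize_sequence_differences
  simp only [visualize_sequence_differences, visualize_sequence_differences_alt]
  refine congrArg String.ofList (viz_main _ _ _ _ ?_)
  split_ifs with h
  · omega
  · omega
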